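-- pv_equiv track=rewrite | github.com/specklesystems/speckle-qgis | plugin_utils/helpers.py | getAppName
-- ===== SOURCE A (Python) =====
-- def getAppName(name: str) -> str:
--     new_name = ""
--     for i, x in enumerate(str(name)):
--         if x.lower() in [a for k, a in enumerate("abcdefghijklmnopqrstuvwxyz")]:
--             new_name += x
--         else:
--             break
--     return new_name
-- ===== SOURCE B (Python) =====
-- import re
--
-- def getAppName(name: str) -> str:
--     return re.match(r'[A-Za-z]*', str(name)).group(0)
-- ===== Notes on version B (the rewrite author's own statement) =====
-- stated objective: faster
-- what changed: Replaces the per-character enumerate/lower/membership loop (which rebuilds the 26-element alphabet list on every iteration) with a single C-level regex match of the maximal leading ASCII-letter run.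
import Mathlib
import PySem

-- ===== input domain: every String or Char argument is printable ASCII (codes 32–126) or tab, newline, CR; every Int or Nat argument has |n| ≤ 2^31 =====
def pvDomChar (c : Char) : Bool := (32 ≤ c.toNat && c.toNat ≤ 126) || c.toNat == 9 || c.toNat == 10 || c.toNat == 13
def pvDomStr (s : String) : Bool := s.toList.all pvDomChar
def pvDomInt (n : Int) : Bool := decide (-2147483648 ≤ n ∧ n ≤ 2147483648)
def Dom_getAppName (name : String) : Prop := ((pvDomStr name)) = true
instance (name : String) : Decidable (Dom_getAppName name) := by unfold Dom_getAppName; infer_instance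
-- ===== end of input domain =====

-- B replaces A's per-character scan with a regex match of the maximal leading ASCII-letter run (idiomatic; same cost).

-- ===== PORT A =====
-- the loop: for i, x in enumerate(str(name)): if x.lower() in [a for k, a in enumerate(alphabet)]: new_name += x; else: break
def getAppNameLoop : String → List (Int × Char) → String
  | new_name, [] => new_name
  | new_name, (_, x) :: rest =>
    if PySem.Chars.lowerChar x ∈
        (PySem.List.enumerate "abcdefghijklmnopqrstuvwxyz".toList).map (·.2) then
      getAppNameLoop (new_name.push x) rest
    else new_name

def getAppName (name : String) : String :=
  getAppNameLoop "" (PySem.List.enumerate name.toList)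

-- ===== PORT B =====
-- re.match(r'[A-Za-z]*', name).group(0): the maximal leading run of ASCII letters
def getAppName_alt (name : String) : String :=
  String.ofList (name.toList.takeWhile (fun c =>
    ('A' ≤ c && c ≤ 'Z') || ('a' ≤ c && c ≤ 'z')))

-- ===== PRECONDITION & SPEC =====
def Spec_getAppName (name : String) (out : String) : Prop := out = getAppName_alt name
instance (name : String) (out : String) : Decidable (Spec_getAppName name out) := by unfold Spec_getAppName; infer_instance

-- ===== CLAIM (what is proved, stated in full; the proofs are below) =====
def Claim_equal_getAppName : Prop := ∀ (name : String), Dom_getAppName name → Spec_getAppName name (getAppName name)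

-- ===== LEMMAS AND PROOFS =====

lemma mem_alphabet (x : Char) :
    x ∈ "abcdefghijklmnopqrstuvwxyz".toList ↔ ('a' ≤ x ∧ x ≤ 'z') := by
  simp [List.mem_cons, Char.le_def, Char.ext_iff, UInt32.le_iff_toNat_le, UInt32.ext_iff]
  omega

lemma cond_iff (x : Char) :
    (PySem.Chars.lowerChar x ∈
      (PySem.List.enumerate "abcdefghijklmnopqrstuvwxyz".toList).map (·.2)) ↔
    (('A' ≤ x && x ≤ 'Z') || ('a' ≤ x && x ≤ 'z')) = true := by
  rw [PySem.List.map_snd_enumerate, mem_alphabet]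
  simp only [Bool.or_eq_true, Bool.and_eq_true, decide_eq_true_eq]
  unfold PySem.Chars.lowerChar PySem.Chars.isupper
  have ha : ('a'.val).toNat = 97 := rfl
  have hz : ('z'.val).toNat = 122 := rfl
  have hA : ('A'.val).toNat = 65 := rfl
  have hZ : ('Z'.val).toNat = 90 := rfl
  split_ifs with h
  · simp only [Bool.and_eq_true, decide_eq_true_eq, Char.le_def,
      UInt32.le_iff_toNat_le] at h
    have hlt : x.toNat + 32 < 0xd800 := by unfold Char.toNat; omega
    have hn : (Char.ofNat (x.toNat + 32)).toNat = x.toNat + 32 := by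
      rw [Char.toNat_ofNat, if_pos (Or.inl hlt)]
    unfold Char.toNat at hn
    simp only [Char.le_def, UInt32.le_iff_toNat_le, ha, hz, hA, hZ]
    unfold Char.toNat
    omega
  · simp only [Bool.and_eq_true, decide_eq_true_eq, Char.le_def,
      UInt32.le_iff_toNat_le, not_and, not_le] at h
    simp only [Char.le_def, UInt32.le_iff_toNat_le, ha, hz, hA, hZ]
    rw [hA, hZ] at h
    omega

lemma loop_eq (l : List Char) (i : Int) (acc : String) :
    getAppNameLoop acc (PySem.List.enumerate l i) =
      acc ++ String.ofList (l.takeWhile (fun c =>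
        ('A' ≤ c && c ≤ 'Z') || ('a' ≤ c && c ≤ 'z'))) := by
  induction l generalizing i acc with
  | nil =>
    rw [← String.toList_inj]
    simp [PySem.List.enumerate_nil, getAppNameLoop]
  | cons c cs ih =>
    rw [PySem.List.enumerate_cons, List.takeWhile]
    by_cases h : (('A' ≤ c && c ≤ 'Z') || ('a' ≤ c && c ≤ 'z')) = true
    · rw [getAppNameLoop, if_pos ((cond_iff c).mpr h), ih, h]
      rw [← String.toList_inj]
      simp
    · rw [getAppNameLoop, if_neg (fun hm => h ((cond_iff c).mp hm)),
        Bool.eq_false_iff.mpr h]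
      rw [← String.toList_inj]
      simp

-- ===== VERDICT (by name: the statement is the Claim_ definition above) =====
theorem getAppName_spec : Claim_equal_getAppName := by
  intro name _
  unfold Spec_getAppName getAppName getAppName_alt
  rw [loop_eq name.toList 0 "", ← String.toList_inj]
  simp
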